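-- pv_equiv track=rewrite | github.com/NAMWANHEE/algorithm-python | 프로그래머스/Level1/체육복.py | solution
-- ===== SOURCE A (Python) =====
-- def solution(n, lost, reserve):
--     answer = 0
--     c = 0   # 잃어버린 학생중 여분옷 받은 학생의 수
--     lost.sort()
--     for i in lost[:]:         # 잃어버린 학생중 여분의 옷을 가져온 학생이 있으면
--         if i in reserve:      # 두 리스트에서 해당 학생 삭제
--             reserve.remove(i)
--             lost.remove(i)
--
--     for i in lost:                # 잃어버린 학생 반복
--         if i - 1 in reserve:      # 잃어버린 학생의 앞 번호 학생이 여분의 옷을 가져온경우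
--             reserve.remove(i - 1) # 여분옷 가져온 리스트에서 해당학생 삭제
--             c += 1                # 카운트 +1
--         elif i + 1 in reserve:    # 잃어버린 학생 다음학생이 여분의 옷을 가져온경우
--             reserve.remove(i + 1) # 위와 동일
--             c += 1
--     answer = n - len(lost) + c    # 체육복 있는 학생 수 = 전체 - 안가져온 학생수 + 여분옷 받은 학생의 수
--     return answer
-- ===== SOURCE B (Python) =====
-- def solution(n, lost, reserve):
--     # Sort both lists once, cancel equal values with one merge pass, then match
--     # remaining lost to i-1/i+1 spares with a single forward two-pointer sweep.
--     ls, rs = sorted(lost), sorted(reserve)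
--     need, rem = [], []
--     a = b = 0
--     while a < len(ls) and b < len(rs):
--         if ls[a] == rs[b]:
--             a += 1
--             b += 1
--         elif ls[a] < rs[b]:
--             need.append(ls[a])
--             a += 1
--         else:
--             rem.append(rs[b])
--             b += 1
--     need.extend(ls[a:])
--     rem.extend(rs[b:])
--     c = 0
--     j = 0
--     for i in need:
--         while j < len(rem) and rem[j] < i - 1:
--             j += 1
--         if j < len(rem) and rem[j] <= i + 1:
--             c += 1
--             j += 1
--     return n - len(need) + c
-- ===== Notes on version B (the rewrite author's own statement) =====
-- stated objective: faster
-- what changed: Replaces A's mutate-two-lists scans ('in'/'remove' over lists) by sorting both lists and making two linear merge-style passes: one merge pass over the two sorted lists cancels equal values, then a single forward two-pointer sweep matches each remaining lost student to an i-1/i+1 spare; no membership scans, no element removal, A's list arguments are not mutated.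
import Mathlib
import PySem

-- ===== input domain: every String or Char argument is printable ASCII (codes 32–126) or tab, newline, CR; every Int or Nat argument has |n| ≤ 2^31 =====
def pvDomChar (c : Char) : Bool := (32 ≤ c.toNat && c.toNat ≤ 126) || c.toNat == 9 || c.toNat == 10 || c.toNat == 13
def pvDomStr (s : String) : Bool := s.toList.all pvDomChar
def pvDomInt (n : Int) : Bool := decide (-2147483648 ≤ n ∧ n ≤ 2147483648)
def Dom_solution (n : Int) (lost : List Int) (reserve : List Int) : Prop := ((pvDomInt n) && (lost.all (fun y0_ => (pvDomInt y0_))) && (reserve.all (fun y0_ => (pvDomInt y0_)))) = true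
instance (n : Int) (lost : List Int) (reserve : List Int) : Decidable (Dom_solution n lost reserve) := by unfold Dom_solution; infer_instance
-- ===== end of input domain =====

-- B replaces A's quadratic mutate-two-lists scans ('in'/'remove' on lists) by
-- sort + one merge pass cancelling equal values + one two-pointer sweep for the
-- i-1/i+1 greedy; return values proved equal on every input
-- (A also sorts/mutates its list arguments in place; only the return value is claimed).

-- ===== PORT A =====
-- lst.remove(v): A always checks membership first, so remove? is some; getD is the total wrapper.
def pvRemove (l : List Int) (v : Int) : List Int := (PySem.List.remove? l v).getD l

def solution (n : Int) (lost : List Int) (reserve : List Int) : Int :=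
  let lostS := PySem.List.sorted lost (fun x => x) false
  -- for i in lost[:]: if i in reserve: reserve.remove(i); lost.remove(i)
  let p1 := lostS.foldl
    (fun (st : List Int × List Int) i =>
      if st.2.contains i then (pvRemove st.1 i, pvRemove st.2 i) else st)
    (lostS, reserve)
  -- for i in lost: greedy borrow from i-1 then i+1
  let p2 := p1.1.foldl
    (fun (st : List Int × Int) i =>
      if st.1.contains (i - 1) then (pvRemove st.1 (i - 1), st.2 + 1)
      else if st.1.contains (i + 1) then (pvRemove st.1 (i + 1), st.2 + 1)
      else st)
    (p1.2, (0 : Int))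
  n - (p1.1.length : Int) + p2.2

-- ===== PORT B =====
-- Source B's index-based merge while-loop, transcribed as the standard recursion on
-- the two list suffixes (a/b advancing = consuming a head).
def pvMerge : List Int → List Int → List Int × List Int
  | [], rs => ([], rs)
  | x :: ls, [] => (x :: ls, [])
  | x :: ls, y :: rs =>
    if x = y then pvMerge ls rs
    else if x < y then
      let p := pvMerge ls (y :: rs)
      (x :: p.1, p.2)
    else
      let p := pvMerge (x :: ls) rs
      (p.1, y :: p.2)
termination_by ls rs => ls.length + rs.length

-- Source B's inner 'while j < len(rem) and rem[j] < i - 1: j += 1'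
def pvSkip (rem : List Int) (i : Int) (j : Nat) : Nat :=
  if h : j < rem.length then
    if rem[j] < i - 1 then pvSkip rem i (j + 1) else j
  else j
termination_by rem.length - j

def solution_alt (n : Int) (lost : List Int) (reserve : List Int) : Int :=
  let p := pvMerge (PySem.List.sorted lost (fun x => x) false)
                   (PySem.List.sorted reserve (fun x => x) false)
  -- for i in need: skip rem[j] < i-1; take rem[j] if rem[j] <= i+1
  let g := p.1.foldl
    (fun (st : Nat × Int) i =>
      let j := pvSkip p.2 i st.1
      if h : j < p.2.length then
        if p.2[j] ≤ i + 1 then (j + 1, st.2 + 1) else (j, st.2)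
      else (j, st.2))
    (0, (0 : Int))
  n - (p.1.length : Int) + g.2

-- ===== PRECONDITION & SPEC =====
def Spec_solution (n : Int) (lost : List Int) (reserve : List Int) (out : Int) : Prop := out = solution_alt n lost reserve
instance (n : Int) (lost : List Int) (reserve : List Int) (out : Int) : Decidable (Spec_solution n lost reserve out) := by unfold Spec_solution; infer_instance

-- ===== CLAIM (what is proved, stated in full; the proofs are below) =====
def Claim_equal_solution : Prop := ∀ (n : Int) (lost : List Int) (reserve : List Int), Dom_solution n lost reserve → Spec_solution n lost reserve (solution n lost reserve)

-- ===== LEMMAS AND PROOFS =====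
-- Source B emits rem elements below every remaining lost value immediately
lemma pvMerge_emit (ls rs : List Int) (y : Int) (h : ∀ a ∈ ls, y < a) :
    pvMerge ls (y :: rs) = ((pvMerge ls rs).1, y :: (pvMerge ls rs).2) := by
  cases ls with
  | nil => simp [pvMerge]
  | cons a ls' =>
    have hy : y < a := h a (by simp)
    rw [pvMerge]
    rw [if_neg (by omega), if_neg (by omega)]

lemma pvMerge_nil_right (ls : List Int) : pvMerge ls [] = (ls, []) := by
  cases ls <;> simp [pvMerge]

-- head of sorted lost absent from sorted reserve: it goes to `need`
lemma pvMerge_of_not_mem (x : Int) (ls rs : List Int)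
    (hls : ∀ a ∈ ls, x ≤ a) (hrs : rs.Pairwise (· ≤ ·)) (hx : x ∉ rs) :
    pvMerge (x :: ls) rs = (x :: (pvMerge ls rs).1, (pvMerge ls rs).2) := by
  induction rs generalizing ls with
  | nil => rw [pvMerge_nil_right, pvMerge_nil_right]
  | cons y rs' ih =>
    have hxy : x ≠ y := by intro h; exact hx (by simp [h])
    rcases lt_trichotomy x y with hlt | heq | hgt
    · rw [pvMerge, if_neg (by omega), if_pos hlt]
    · exact absurd heq hxy
    · have hx' : x ∉ rs' := fun h => hx (by simp [h])
      rw [pvMerge, if_neg (by omega), if_neg (by omega),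
        ih ls hls (List.Pairwise.sublist (List.sublist_cons_self y rs') hrs) hx',
        pvMerge_emit ls rs' y (fun a ha => lt_of_lt_of_le hgt (hls a ha))]

-- head of sorted lost present in sorted reserve: the pair cancels
lemma pvMerge_of_mem (x : Int) (ls rs : List Int)
    (hls : ∀ a ∈ ls, x ≤ a) (hrs : rs.Pairwise (· ≤ ·)) (hx : x ∈ rs) :
    pvMerge (x :: ls) rs = pvMerge ls (rs.erase x) := by
  induction rs generalizing ls with
  | nil => exact absurd hx (by simp)
  | cons y rs' ih =>
    rcases lt_trichotomy x y with hlt | heq | hgt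
    · exfalso
      have : x ∈ rs' := by
        rcases List.mem_cons.mp hx with h | h
        · omega
        · exact h
      have := (List.pairwise_cons.mp hrs).1 x this
      omega
    · subst heq
      rw [pvMerge, if_pos rfl, List.erase_cons_head]
    · have hxy : x ≠ y := by omega
      have hx' : x ∈ rs' := by
        rcases List.mem_cons.mp hx with h | h
        · exact absurd h hxy
        · exact h
      rw [pvMerge, if_neg (by omega), if_neg (by omega),
        ih ls hls (List.Pairwise.sublist (List.sublist_cons_self y rs') hrs) hx',
        List.erase_cons_tail (by simp [Ne.symm hxy]),
        pvMerge_emit ls (rs'.erase x) y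
          (fun a ha => lt_of_lt_of_le hgt (hls a ha))]

-- shape of Source B's merge outputs: sorted, drawn from the inputs
lemma pvMerge_shape (ls rs : List Int)
    (hls : ls.Pairwise (· ≤ ·)) (hrs : rs.Pairwise (· ≤ ·)) :
    (pvMerge ls rs).1.Pairwise (· ≤ ·) ∧ (pvMerge ls rs).2.Pairwise (· ≤ ·) ∧
      (∀ v ∈ (pvMerge ls rs).1, v ∈ ls) ∧ (∀ v ∈ (pvMerge ls rs).2, v ∈ rs) := by
  induction ls, rs using pvMerge.induct with
  | case1 rs => simpa [pvMerge] using hrs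
  | case2 x ls => simpa [pvMerge_nil_right] using hls
  | case3 ls y rs ih =>
    rw [pvMerge, if_pos rfl]
    obtain ⟨h1, h2, h3, h4⟩ := ih (List.Pairwise.sublist (List.sublist_cons_self _ _) hls)
      (List.Pairwise.sublist (List.sublist_cons_self _ _) hrs)
    exact ⟨h1, h2, fun v hv => by simp [h3 v hv], fun v hv => by simp [h4 v hv]⟩
  | case4 x ls y rs hne hlt ih =>
    rw [pvMerge, if_neg hne, if_pos hlt]
    obtain ⟨h1, h2, h3, h4⟩ := ih (List.Pairwise.sublist (List.sublist_cons_self _ _) hls) hrs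
    refine ⟨List.pairwise_cons.mpr ⟨fun a ha => (List.pairwise_cons.mp hls).1 a (h3 a ha), h1⟩, h2, ?_, h4⟩
    intro v hv
    rcases List.mem_cons.mp hv with h | h
    · simp [h]
    · simp [h3 v h]
  | case5 x ls y rs hne hnlt ih =>
    rw [pvMerge, if_neg hne, if_neg hnlt]
    obtain ⟨h1, h2, h3, h4⟩ := ih hls (List.Pairwise.sublist (List.sublist_cons_self _ _) hrs)
    refine ⟨h1, List.pairwise_cons.mpr ⟨fun a ha => (List.pairwise_cons.mp hrs).1 a (h4 a ha), h2⟩, h3, ?_⟩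
    intro v hv
    rcases List.mem_cons.mp hv with h | h
    · simp [h]
    · simp [h4 v h]

lemma pvRemove_of_mem {l : List Int} {v : Int} (h : v ∈ l) : pvRemove l v = l.erase v := by
  simp [pvRemove, PySem.List.remove?_eq_some_erase l v h]

-- phase 1: A's interleaved delete-from-both-lists loop vs Source B's merge pass
lemma pv_phase1 (todo keep res rs : List Int)
    (htodo : todo.Pairwise (· ≤ ·))
    (hrs : rs.Pairwise (· ≤ ·))
    (hcnt : ∀ v, res.count v = rs.count v)
    (hkeep : ∀ k ∈ keep, res.count k = 0) :
    (todo.foldl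
      (fun (st : List Int × List Int) i =>
        if st.2.contains i then (pvRemove st.1 i, pvRemove st.2 i) else st)
      (keep ++ todo, res)).1 = keep ++ (pvMerge todo rs).1 ∧
    (∀ v, (todo.foldl
      (fun (st : List Int × List Int) i =>
        if st.2.contains i then (pvRemove st.1 i, pvRemove st.2 i) else st)
      (keep ++ todo, res)).2.count v = (pvMerge todo rs).2.count v) ∧
    (∀ k ∈ keep ++ (pvMerge todo rs).1,
      (todo.foldl
      (fun (st : List Int × List Int) i =>
        if st.2.contains i then (pvRemove st.1 i, pvRemove st.2 i) else st)
      (keep ++ todo, res)).2.count k = 0) := by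
  induction todo generalizing keep res rs with
  | nil =>
    simp only [List.foldl_nil, List.append_nil, pvMerge]
    exact ⟨by simp, hcnt, by simpa using hkeep⟩
  | cons i rest ih =>
    have hrest : ∀ a ∈ rest, i ≤ a := (List.pairwise_cons.mp htodo).1
    have hrest' : rest.Pairwise (· ≤ ·) := (List.pairwise_cons.mp htodo).2
    simp only [List.foldl_cons]
    by_cases hi : i ∈ rs
    · -- matched: A removes i from both lists, merge cancels the pair
      have himem : i ∈ res := by
        have := hcnt i
        have : 0 < res.count i := by
          rw [hcnt i]; exact List.count_pos_iff.mpr hi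
        exact List.count_pos_iff.mp this
      have hik : i ∉ keep := fun hk => by
        have h0 := hkeep i hk
        have := List.count_pos_iff.mpr himem
        omega
      have hrm1 : pvRemove (keep ++ i :: rest) i = keep ++ rest := by
        rw [pvRemove_of_mem (by simp), List.erase_append_right _ hik, List.erase_cons_head]
      have hcontains : (res.contains i) = true := by simpa using himem
      rw [hcontains, if_pos rfl, hrm1, pvRemove_of_mem himem,
        pvMerge_of_mem i rest rs hrest hrs hi]
      exact ih keep (res.erase i) (rs.erase i) hrest'
        (List.Pairwise.sublist (List.erase_sublist) hrs)
        (fun v => by rw [List.count_erase, List.count_erase, hcnt v])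
        (fun k hk => by
          have h0 := hkeep k hk
          have := List.Sublist.count_le k (List.erase_sublist (a := i) (l := res))
          omega)
    · -- unmatched: i stays in lost / goes to need
      have himem : i ∉ res := fun hm => by
        have := List.count_pos_iff.mpr hm
        have := hcnt i
        have : rs.count i = 0 := List.count_eq_zero.mpr hi
        omega
      have hcontains : (res.contains i) = false := by simpa using himem
      rw [hcontains, if_neg (by simp),
        pvMerge_of_not_mem i rest rs hrest hrs hi]
      have hsplit : keep ++ i :: rest = (keep ++ [i]) ++ rest := by simp
      rw [hsplit]
      have := ih (keep ++ [i]) res rs hrest' hrs hcnt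
        (fun k hk => by
          rcases List.mem_append.mp hk with h | h
          · exact hkeep k h
          · have : k = i := by simpa using h
            subst this
            exact List.count_eq_zero.mpr himem)
      simpa using this

-- the skip loop drops only values below i-1
lemma pvSkip_count (rem : List Int) (i : Int) (j : Nat) :
    ∀ v, i - 1 ≤ v → (rem.drop (pvSkip rem i j)).count v = (rem.drop j).count v := by
  induction j using pvSkip.induct rem i with
  | case1 j hj hlt ih =>
    intro v hv
    rw [pvSkip, dif_pos hj, if_pos hlt, ih v hv, List.drop_eq_getElem_cons hj,
      List.count_cons]
    simp [show ¬ rem[j] = v by omega]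
  | case2 j hj hnlt =>
    intro v _
    rw [pvSkip, dif_pos hj, if_neg hnlt]
  | case3 j hj =>
    intro v _
    rw [pvSkip, dif_neg hj]

-- where the skip loop stops, the element is ≥ i-1
lemma pvSkip_stop (rem : List Int) (i : Int) (j : Nat)
    (h : pvSkip rem i j < rem.length) : i - 1 ≤ rem[pvSkip rem i j] := by
  induction j using pvSkip.induct rem i with
  | case1 j hj hlt ih =>
    have he : pvSkip rem i j = pvSkip rem i (j + 1) := by
      rw [pvSkip, dif_pos hj, if_pos hlt]
    simp only [he] at h ⊢
    exact ih h
  | case2 j hj hnlt =>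
    have he : pvSkip rem i j = j := by
      rw [pvSkip, dif_pos hj, if_neg hnlt]
    simp only [he] at h ⊢
    omega
  | case3 j hj =>
    have he : pvSkip rem i j = j := by
      rw [pvSkip, dif_neg hj]
    simp only [he] at h
    omega

-- phase 2: A's greedy with list removal vs Source B's two-pointer sweep
lemma pv_phase2 (need : List Int) (rem : List Int) (res : List Int) (j : Nat) (c : Int) (b : Int)
    (hsn : need.Pairwise (· ≤ ·))
    (hb : ∀ i ∈ need, b ≤ i)
    (hrem : rem.Pairwise (· ≤ ·))
    (hz : ∀ v ∈ need, res.count v = 0)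
    (hinv : ∀ v, b - 1 ≤ v → res.count v = (rem.drop j).count v) :
    (need.foldl
      (fun (st : List Int × Int) i =>
        if st.1.contains (i - 1) then (pvRemove st.1 (i - 1), st.2 + 1)
        else if st.1.contains (i + 1) then (pvRemove st.1 (i + 1), st.2 + 1)
        else st)
      (res, c)).2 =
    (need.foldl
      (fun (st : Nat × Int) i =>
        let j' := pvSkip rem i st.1
        if _h : j' < rem.length then
          if rem[j'] ≤ i + 1 then (j' + 1, st.2 + 1) else (j', st.2)
        else (j', st.2))
      (j, c)).2 := by
  induction need generalizing res j c b with
  | nil => rfl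
  | cons i rest ih =>
    have hbi : b ≤ i := hb i (by simp)
    have hti : ∀ a ∈ rest, i ≤ a := (List.pairwise_cons.mp hsn).1
    have htr : rest.Pairwise (· ≤ ·) := (List.pairwise_cons.mp hsn).2
    have hcnt' : ∀ v, i - 1 ≤ v → res.count v = (rem.drop (pvSkip rem i j)).count v :=
      fun v hv => (hinv v (by omega)).trans (pvSkip_count rem i j v hv).symm
    have hds : (rem.drop (pvSkip rem i j)).Pairwise (· ≤ ·) :=
      List.Pairwise.sublist (List.drop_sublist _ _) hrem
    simp only [List.foldl_cons]
    by_cases h1 : (i - 1) ∈ res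
    · -- A takes i-1; after the skip, rem[j'] = i-1
      have hc1 : 0 < (rem.drop (pvSkip rem i j)).count (i - 1) := by
        rw [← hcnt' (i - 1) (by omega)]
        exact List.count_pos_iff.mpr h1
      have hm1 : (i - 1) ∈ rem.drop (pvSkip rem i j) := List.count_pos_iff.mp hc1
      have hlen : pvSkip rem i j < rem.length := by
        by_contra hn
        rw [List.drop_eq_nil_of_le (by omega)] at hm1
        simp at hm1
      have hdrop : rem.drop (pvSkip rem i j) =
          rem[pvSkip rem i j] :: rem.drop (pvSkip rem i j + 1) :=
        List.drop_eq_getElem_cons hlen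
      have hhead : rem[pvSkip rem i j] = i - 1 := by
        have hge := pvSkip_stop rem i j hlen
        rw [hdrop] at hm1
        rcases List.mem_cons.mp hm1 with h | h
        · omega
        · have := (List.pairwise_cons.mp (hdrop ▸ hds)).1 _ h
          omega
      have hca : (res.contains (i - 1)) = true := by simpa using h1
      rw [hca, if_pos rfl, pvRemove_of_mem h1]
      rw [dif_pos hlen, if_pos (by omega)]
      refine ih (res.erase (i - 1)) (pvSkip rem i j + 1) (c + 1) i htr hti ?_ ?_
      · intro v hv
        have h0 := hz v (by simp [hv])
        have := List.Sublist.count_le v (List.erase_sublist (a := i - 1) (l := res))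
        omega
      · intro v hv
        have hc := hcnt' v hv
        rw [hdrop, hhead] at hc
        rw [List.count_erase]
        by_cases hvi : v = i - 1
        · subst hvi
          simp at hc ⊢
          omega
        · simp [Ne.symm hvi] at hc ⊢
          omega
    · have hz1 : (rem.drop (pvSkip rem i j)).count (i - 1) = 0 := by
        rw [← hcnt' (i - 1) (by omega)]
        exact List.count_eq_zero.mpr h1
      have hn1 : (i - 1) ∉ rem.drop (pvSkip rem i j) := List.count_eq_zero.mp hz1
      have hn0 : i ∉ rem.drop (pvSkip rem i j) := by
        refine List.count_eq_zero.mp ?_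
        rw [← hcnt' i (by omega)]
        exact hz i (by simp)
      have hca : (res.contains (i - 1)) = false := by simpa using h1
      by_cases h2 : (i + 1) ∈ res
      · -- A takes i+1; after the skip, rem[j'] = i+1
        have hc2 : 0 < (rem.drop (pvSkip rem i j)).count (i + 1) := by
          rw [← hcnt' (i + 1) (by omega)]
          exact List.count_pos_iff.mpr h2
        have hm2 : (i + 1) ∈ rem.drop (pvSkip rem i j) := List.count_pos_iff.mp hc2
        have hlen : pvSkip rem i j < rem.length := by
          by_contra hn
          rw [List.drop_eq_nil_of_le (by omega)] at hm2
          simp at hm2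
        have hdrop : rem.drop (pvSkip rem i j) =
            rem[pvSkip rem i j] :: rem.drop (pvSkip rem i j + 1) :=
          List.drop_eq_getElem_cons hlen
        have hheadmem : rem[pvSkip rem i j] ∈ rem.drop (pvSkip rem i j) := by
          conv => rw [hdrop]
          exact List.mem_cons_self
        have hhead : rem[pvSkip rem i j] = i + 1 := by
          have hge := pvSkip_stop rem i j hlen
          have hne1 : rem[pvSkip rem i j] ≠ i - 1 := by
            intro h
            rw [h] at hheadmem
            exact hn1 hheadmem
          have hne0 : rem[pvSkip rem i j] ≠ i := by
            intro h
            rw [h] at hheadmem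
            exact hn0 hheadmem
          rw [hdrop] at hm2
          rcases List.mem_cons.mp hm2 with h | h
          · omega
          · have := (List.pairwise_cons.mp (hdrop ▸ hds)).1 _ h
            omega
        have hca2 : (res.contains (i + 1)) = true := by simpa using h2
        rw [hca, if_neg (by simp), hca2, if_pos rfl, pvRemove_of_mem h2]
        rw [dif_pos hlen, if_pos (by omega)]
        refine ih (res.erase (i + 1)) (pvSkip rem i j + 1) (c + 1) i htr hti ?_ ?_
        · intro v hv
          have h0 := hz v (by simp [hv])
          have := List.Sublist.count_le v (List.erase_sublist (a := i + 1) (l := res))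
          omega
        · intro v hv
          have hc := hcnt' v hv
          rw [hdrop, hhead] at hc
          rw [List.count_erase]
          by_cases hvi : v = i + 1
          · subst hvi
            simp at hc ⊢
            omega
          · simp [Ne.symm hvi] at hc ⊢
            omega
      · -- neither side takes anything
        have hn2 : (i + 1) ∉ rem.drop (pvSkip rem i j) := by
          refine List.count_eq_zero.mp ?_
          rw [← hcnt' (i + 1) (by omega)]
          exact List.count_eq_zero.mpr h2
        have hca2 : (res.contains (i + 1)) = false := by simpa using h2
        rw [hca, if_neg (by simp), hca2, if_neg (by simp)]
        by_cases hlen : pvSkip rem i j < rem.length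
        · have hdrop : rem.drop (pvSkip rem i j) =
              rem[pvSkip rem i j] :: rem.drop (pvSkip rem i j + 1) :=
            List.drop_eq_getElem_cons hlen
          have hheadmem : rem[pvSkip rem i j] ∈ rem.drop (pvSkip rem i j) := by
            conv => rw [hdrop]
            exact List.mem_cons_self
          have hge := pvSkip_stop rem i j hlen
          have hne1 : rem[pvSkip rem i j] ≠ i - 1 := by
            intro h
            rw [h] at hheadmem
            exact hn1 hheadmem
          have hne0 : rem[pvSkip rem i j] ≠ i := by
            intro h
            rw [h] at hheadmem
            exact hn0 hheadmem
          have hne2 : rem[pvSkip rem i j] ≠ i + 1 := by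
            intro h
            rw [h] at hheadmem
            exact hn2 hheadmem
          rw [dif_pos hlen, if_neg (by omega)]
          exact ih res (pvSkip rem i j) c i htr hti
            (fun v hv => hz v (by simp [hv])) hcnt'
        · rw [dif_neg hlen]
          exact ih res (pvSkip rem i j) c i htr hti
            (fun v hv => hz v (by simp [hv])) hcnt'

-- ===== VERDICT (by name: the statement is the Claim_ definition above) =====
theorem solution_spec : Claim_equal_solution := by
  intro n lost reserve _
  unfold Spec_solution solution solution_alt
  dsimp only
  have hls : (PySem.List.sorted lost (fun x => x) false).Pairwise (· ≤ ·) :=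
    PySem.List.sorted_pairwise lost (fun x => x)
  have hrs : (PySem.List.sorted reserve (fun x => x) false).Pairwise (· ≤ ·) :=
    PySem.List.sorted_pairwise reserve (fun x => x)
  have hcnt : ∀ v, reserve.count v =
      (PySem.List.sorted reserve (fun x => x) false).count v :=
    fun v => (List.Perm.count_eq (PySem.List.sorted_perm reserve (fun x => x) false) v).symm
  obtain ⟨h1, h2, h3⟩ := pv_phase1 (PySem.List.sorted lost (fun x => x) false) []
    reserve (PySem.List.sorted reserve (fun x => x) false) hls hrs hcnt (by simp)
  simp only [List.nil_append] at h1 h2 h3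
  obtain ⟨hneed_s, hrem_s, -, -⟩ := pvMerge_shape
    (PySem.List.sorted lost (fun x => x) false)
    (PySem.List.sorted reserve (fun x => x) false) hls hrs
  rw [h1]
  congr 1
  rcases hne : (pvMerge (PySem.List.sorted lost (fun x => x) false)
      (PySem.List.sorted reserve (fun x => x) false)).1 with _ | ⟨i0, restl⟩
  · rfl
  · refine pv_phase2 (i0 :: restl) _ _ 0 0 i0 (hne ▸ hneed_s) ?_ hrem_s ?_ ?_
    · intro i hi
      rcases List.mem_cons.mp hi with h | h
      · omega
      · exact (List.pairwise_cons.mp (hne ▸ hneed_s)).1 i h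
    · intro v hv
      exact h3 v (hne ▸ hv)
    · intro v _
      simpa using h2 v
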